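-- pv_equiv track=rewrite | github.com/ebmoon/transformers-GAD | get_desired_string_dict.py | generate_strings_len_k
-- ===== SOURCE A (Python) =====
-- def generate_strings_len_k(cfg, k):
--     """
--     Generate all unique strings of exact length k from the given context-free grammar.
--     :param cfg: Context-free grammar as a dictionary
--     :param k: Target length of strings to generate
--     :return: A list of all unique possible strings of length k
--     """
--     def expand(symbol, target_length):
--         # Base case: return the symbol if it's terminal and matches the target length
--         if symbol not in cfg:
--             return {symbol} if len(symbol) == target_length else set()
--
--         # Recursive case: explore all production rules
--         results = set()
--         for production in cfg[symbol]:
--             if len(production.replace('s', '')) > target_length: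
--                 # Skip productions that are already too long
--                 continue
--
--             if 's' not in production:  # Direct terminal string production
--                 if len(production) == target_length:
--                     results.add(production)
--             else:
--                 # Calculate needed length for recursive expansions
--                 fixed_length = len(production.replace('s', ''))
--                 for i in range(1, target_length - fixed_length + 1):
--                     for part in expand('s', i):
--                         new_prod = production.replace('s', part, 1)
--                         if len(new_prod) == target_length:
--                             results.add(new_prod)
--         return results
--
--     # Start expansion from the root symbol
--     return list(expand('root', k))
-- ===== SOURCE B (Python) =====
-- def generate_strings_len_k(cfg, k):
--     """
--     Generate all unique strings of exact length k from the grammar, bottom-up: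
--     the expansions of the nonterminal 's' are tabulated once per length,
--     shortest first, so no subproblem is ever recomputed.
--     """
--     def derivations(symbol, n, table):
--         # All strings of length n derivable from `symbol`.
--         if symbol not in cfg:  # a symbol without rules is a terminal
--             return {symbol} if len(symbol) == n else set()
--         found = set()
--         for prod in cfg[symbol]:
--             fixed = len(prod.replace('s', ''))
--             if fixed > n:
--                 continue
--             if 's' not in prod:
--                 if len(prod) == n:
--                     found.add(prod)
--             else:
--                 for i in range(1, n - fixed + 1):
--                     for sub in table.get(i, ()):
--                         t = prod.replace('s', sub, 1)
--                         if len(t) == n: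
--                             found.add(t)
--         return found
--
--     # largest 's'-length any root production can ask for
--     need = 0
--     for prod in cfg.get('root', ()):
--         if 's' in prod:
--             need = max(need, k - len(prod.replace('s', '')))
--
--     table = {}
--     for i in range(1, need + 1):
--         table[i] = derivations('s', i, table)
--
--     return list(derivations('root', k, table))
-- ===== Notes on version B (the rewrite author's own statement) =====
-- stated objective: alternative
-- what changed: A expands the grammar by naive top-down recursion, re-deriving expand('s', i) exponentially often; B tabulates the expansions of 's' bottom-up (each length computed once from shorter entries) and reuses one generic `derivations` pass for the table and for the root. Pre_ excludes only the grammars on which A's recursion never terminates (RecursionError): a reachable cfg['s'] production made of 's' characters only.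
import Mathlib
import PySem

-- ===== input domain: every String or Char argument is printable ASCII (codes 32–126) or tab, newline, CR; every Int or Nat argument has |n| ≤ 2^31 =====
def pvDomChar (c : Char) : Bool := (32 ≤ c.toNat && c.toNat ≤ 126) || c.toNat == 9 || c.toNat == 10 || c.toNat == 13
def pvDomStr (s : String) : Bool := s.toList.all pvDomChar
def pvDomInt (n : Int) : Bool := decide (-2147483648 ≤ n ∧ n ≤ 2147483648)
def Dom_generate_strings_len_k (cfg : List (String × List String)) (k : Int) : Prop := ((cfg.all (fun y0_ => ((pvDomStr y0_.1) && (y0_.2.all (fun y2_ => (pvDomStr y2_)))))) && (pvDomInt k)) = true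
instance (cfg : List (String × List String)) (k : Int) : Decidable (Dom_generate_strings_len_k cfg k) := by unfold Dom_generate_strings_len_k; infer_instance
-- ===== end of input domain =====

-- B replaces A's naive top-down recursion by a bottom-up table: every expansion
-- of the nonterminal 's' at a given length is computed exactly once.

-- ===== PORT A =====
-- hand port of Python's p.replace('s', part, 1) for the single-char pattern 's':
-- exact — it splices `part` in place of the leftmost 's' and leaves the rest unscanned.
def pvReplace1 (part : List Char) : List Char → List Char
  | [] => []
  | c :: rest => if c = 's' then part ++ rest else c :: pvReplace1 part rest

def pvExpandA (d : PySem.Dict String (List String)) : Nat → String → Int → PySem.Set String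
  | 0, _, _ => PySem.Set.empty   -- fuel exhaustion: only reachable where Python A recurses forever (outside Pre_)
  | fuel + 1, symbol, target =>
    match d.get? symbol with
    | none =>
      if (PySem.Str.len symbol : Int) = target then PySem.Set.ofList [symbol] else PySem.Set.empty
    | some prods =>
      prods.foldl (fun results production =>
        if ((PySem.Str.len (PySem.Str.replace production "s" "") : Int) > target) then results
        else if PySem.Str.isIn "s" production = false then
          (if (PySem.Str.len production : Int) = target then PySem.Set.add results production else results)
        else
          (PySem.List.pyRange 1 (target - (PySem.Str.len (PySem.Str.replace production "s" "") : Int) + 1) 1).foldl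
            (fun results i =>
              (pvExpandA d fuel "s" i).foldl (fun results part =>
                let new_prod := String.ofList (pvReplace1 part.toList production.toList)
                if (PySem.Str.len new_prod : Int) = target then PySem.Set.add results new_prod else results)
                results)
            results)
        PySem.Set.empty

def generate_strings_len_k (cfg : List (String × List String)) (k : Int) : List String :=
  pvExpandA (PySem.Dict.ofList cfg) (k.toNat + 2) "root" k

-- ===== PORT B =====
def pvFixedB (p : String) : Int := (PySem.Str.len (PySem.Str.replace p "s" "") : Int)

-- port of Source B's `derivations(symbol, n, table)`
def pvDerivB (d : PySem.Dict String (List String)) (table : PySem.Dict Int (PySem.Set String))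
    (symbol : String) (n : Int) : PySem.Set String :=
  match d.get? symbol with
  | none =>
    if (PySem.Str.len symbol : Int) = n then PySem.Set.ofList [symbol] else PySem.Set.empty
  | some prods =>
    prods.foldl (fun found p =>
      if (pvFixedB p > n) then found
      else if PySem.Str.isIn "s" p = false then
        (if (PySem.Str.len p : Int) = n then PySem.Set.add found p else found)
      else
        (PySem.List.pyRange 1 (n - pvFixedB p + 1) 1).foldl
          (fun found i =>
            (table.getD i PySem.Set.empty).foldl (fun found sub =>
              let t := String.ofList (pvReplace1 sub.toList p.toList)
              if (PySem.Str.len t : Int) = n then PySem.Set.add found t else found)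
              found)
          found)
      PySem.Set.empty

def pvStepB (d : PySem.Dict String (List String)) (table : PySem.Dict Int (PySem.Set String)) (i : Int) :
    PySem.Dict Int (PySem.Set String) :=
  table.insert i (pvDerivB d table "s" i)

def pvBuildTable (d : PySem.Dict String (List String)) (n : Int) : PySem.Dict Int (PySem.Set String) :=
  (PySem.List.pyRange 1 (n + 1) 1).foldl (pvStepB d) PySem.Dict.empty

def generate_strings_len_k_alt (cfg : List (String × List String)) (k : Int) : List String :=
  let d := PySem.Dict.ofList cfg
  let need := (d.getD "root" []).foldl (fun m p => if PySem.Str.isIn "s" p then max m (k - pvFixedB p) else m) 0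
  pvDerivB d (pvBuildTable d need) "root" k

-- ===== PRECONDITION & SPEC =====
-- Pre_ excludes exactly the inputs on which Python A never returns (RecursionError from
-- unbounded recursion): a root production actually recurses into 's' while some production
-- of cfg['s'] consists solely of 's' characters (no fixed character to shrink the target).
def pvPreB (cfg : List (String × List String)) (k : Int) : Bool :=
  match (PySem.Dict.ofList cfg).get? "root" with
  | none => true
  | some rps =>
    if rps.any (fun p => PySem.Str.isIn "s" p && decide (pvFixedB p < k)) then
      match (PySem.Dict.ofList cfg).get? "s" with
      | none => true
      | some sps => sps.all (fun q => !(PySem.Str.isIn "s" q) || decide ((1 : Int) ≤ pvFixedB q))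
    else true

def Pre_generate_strings_len_k (cfg : List (String × List String)) (k : Int) : Prop :=
  pvPreB cfg k = true
instance (cfg : List (String × List String)) (k : Int) : Decidable (Pre_generate_strings_len_k cfg k) := by
  unfold Pre_generate_strings_len_k; infer_instance

def pvWitness_generate_strings_len_k : (List (String × List String)) × Int :=
  ([("root", ["ab", "s"]), ("s", ["a", "b"])], 2)

def Spec_generate_strings_len_k (cfg : List (String × List String)) (k : Int) (out : List String) : Prop := out = generate_strings_len_k_alt cfg k
instance (cfg : List (String × List String)) (k : Int) (out : List String) : Decidable (Spec_generate_strings_len_k cfg k out) := by unfold Spec_generate_strings_len_k; infer_instance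

-- ===== CLAIM (what is proved, stated in full; the proofs are below) =====
def Claim_equal_generate_strings_len_k : Prop := ∀ (cfg : List (String × List String)) (k : Int), Dom_generate_strings_len_k cfg k → Pre_generate_strings_len_k cfg k → Spec_generate_strings_len_k cfg k (generate_strings_len_k cfg k)

-- ===== LEMMAS AND PROOFS =====

-- Nat-indexed view of B's table: pvTabAux d t holds the entries for lengths 1..t.
def pvTabAux (d : PySem.Dict String (List String)) : Nat → PySem.Dict Int (PySem.Set String)
  | 0 => PySem.Dict.empty
  | t + 1 => pvStepB d (pvTabAux d t) ((t : Int) + 1)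

lemma pvBuildTable_aux (d : PySem.Dict String (List String)) (t : Nat) :
    (PySem.List.pyRange 1 ((t : Int) + 1) 1).foldl (pvStepB d) PySem.Dict.empty = pvTabAux d t := by
  induction t with
  | zero => rw [PySem.List.pyRange_one_eq_nil (by omega)]; rfl
  | succ t ih =>
      rw [show ((t + 1 : Nat) : Int) + 1 = ((t : Int) + 1) + 1 by push_cast; ring,
          PySem.List.pyRange_one_succ_right (by omega), List.foldl_append, ih]
      simp [pvTabAux]

lemma pvBuildTable_eq_aux (d : PySem.Dict String (List String)) (n : Int) :
    pvBuildTable d n = pvTabAux d n.toNat := by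
  by_cases h : n ≤ 0
  · unfold pvBuildTable
    rw [PySem.List.pyRange_one_eq_nil (by omega), show n.toNat = 0 by omega]; rfl
  · have hn : n = (n.toNat : Int) := by omega
    unfold pvBuildTable; rw [hn]; exact pvBuildTable_aux d n.toNat

lemma pvTabAux_getD_stable (d : PySem.Dict String (List String)) (t : Nat) (j : Int)
    (h1 : 1 ≤ j) (h2 : j ≤ (t : Int)) :
    (pvTabAux d t).getD j PySem.Set.empty = (pvTabAux d j.toNat).getD j PySem.Set.empty := by
  induction t with
  | zero => omega
  | succ t ih =>
      by_cases hj : j = (t : Int) + 1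
      · rw [show j.toNat = t + 1 by omega]
      · have h2' : j ≤ (t : Int) := by omega
        have : (pvTabAux d (t + 1)).getD j PySem.Set.empty = (pvTabAux d t).getD j PySem.Set.empty := by
          show (pvStepB d (pvTabAux d t) ((t : Int) + 1)).getD j PySem.Set.empty = _
          simp [pvStepB, PySem.Dict.getD_insert, hj]
        rw [this, ih h2']

-- the hypothesis extracted from Pre_: every 's'-production of cfg['s'] keeps at least one fixed char
def pvNoAllS (d : PySem.Dict String (List String)) : Prop :=
  ∀ sps, d.get? "s" = some sps → ∀ q ∈ sps, PySem.Str.isIn "s" q = true →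
    (1 : Int) ≤ pvFixedB q

-- main invariant: with enough fuel, A's recursive expand('s', i) is B's table entry
lemma pvExpand_eq_table (d : PySem.Dict String (List String)) (hH : pvNoAllS d) :
    ∀ fuel i n, 1 ≤ i → i ≤ n → i.toNat < fuel →
      pvExpandA d fuel "s" i = (pvBuildTable d n).getD i PySem.Set.empty := by
  intro fuel
  induction fuel with
  | zero => intro i n h1 _ hf; omega
  | succ f ih =>
      intro i n h1 h2 hf
      obtain ⟨t, ht⟩ : ∃ t : Nat, i = (t : Int) + 1 := ⟨i.toNat - 1, by omega⟩
      rw [pvBuildTable_eq_aux,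
          pvTabAux_getD_stable d n.toNat i h1 (by omega),
          show i.toNat = t + 1 by omega]
      rw [show (pvTabAux d (t + 1)) = pvStepB d (pvTabAux d t) ((t : Int) + 1) from rfl]
      cases hs : d.get? "s" with
      | none =>
          show pvExpandA d (f + 1) "s" i = _
          simp only [pvExpandA, pvStepB, pvDerivB, hs, PySem.Dict.getD_insert, ← ht, if_pos trivial]
      | some sps =>
          show pvExpandA d (f + 1) "s" i = _
          simp only [pvExpandA, pvStepB, pvDerivB, hs, PySem.Dict.getD_insert, ← ht, if_pos trivial]
          apply PySem.List.foldl_congr_mem'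
          intro p hp acc
          simp only [pvFixedB]
          by_cases hskip : (PySem.Str.len (PySem.Str.replace p "s" "") : Int) > i
          · rw [if_pos hskip, if_pos hskip]
          rw [if_neg hskip, if_neg hskip]
          by_cases hin : PySem.Str.isIn "s" p = false
          · rw [if_pos hin, if_pos hin]
          rw [if_neg hin, if_neg hin]
          apply PySem.List.foldl_congr_mem'
          intro j hj acc'
          have hjr := (PySem.List.mem_pyRange_one).1 hj
          have hfx : (1 : Int) ≤ pvFixedB p :=
            hH sps hs p hp (by revert hin; cases PySem.Str.isIn "s" p <;> simp)
          have hfx' : (1 : Int) ≤ (PySem.Str.len (PySem.Str.replace p "s" "") : Int) := hfx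
          have : pvExpandA d f "s" j = (pvTabAux d t).getD j PySem.Set.empty := by
            rw [ih j (t : Int) (by omega) (by omega) (by omega), pvBuildTable_eq_aux,
                show ((t : Int)).toNat = t by omega]
          rw [this]

lemma pvFoldMax_le_init (k : Int) (rps : List String) (m : Int) :
    m ≤ rps.foldl (fun m p => if PySem.Str.isIn "s" p then max m (k - pvFixedB p) else m) m := by
  induction rps generalizing m with
  | nil => simp
  | cons p rest ih =>
      simp only [List.foldl_cons]
      by_cases h : PySem.Str.isIn "s" p <;> simp only [h, if_pos]
      · exact le_trans (le_max_left _ _) (ih (max m (k - pvFixedB p)))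
      · exact ih m

lemma pvFoldMax_ge (k : Int) (rps : List String) (p : String) (hp : p ∈ rps)
    (hs : PySem.Str.isIn "s" p = true) (m : Int) :
    k - pvFixedB p ≤ rps.foldl (fun m p => if PySem.Str.isIn "s" p then max m (k - pvFixedB p) else m) m := by
  induction rps generalizing m with
  | nil => cases hp
  | cons q rest ih =>
      rcases List.mem_cons.1 hp with hp | hp
      · subst hp
        simp only [List.foldl_cons, hs, if_true]
        exact le_trans (le_max_right _ _) (pvFoldMax_le_init k rest _)
      · simp only [List.foldl_cons]
        by_cases h : PySem.Str.isIn "s" q <;> simp only [h] <;> exact ih hp _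

lemma pvPre_noAllS (cfg : List (String × List String)) (k : Int)
    (hpre : Pre_generate_strings_len_k cfg k) (rps : List String)
    (hroot : (PySem.Dict.ofList cfg).get? "root" = some rps)
    (p : String) (hp : p ∈ rps) (hin : PySem.Str.isIn "s" p = true)
    (hfx : pvFixedB p < k) :
    pvNoAllS (PySem.Dict.ofList cfg) := by
  intro sps hsps q hq hqin
  unfold Pre_generate_strings_len_k pvPreB at hpre
  simp only [hroot] at hpre
  have hany : rps.any (fun p => PySem.Str.isIn "s" p && decide (pvFixedB p < k)) = true := by
    apply List.any_eq_true.2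
    exact ⟨p, hp, by simp only [hin, Bool.true_and]; exact decide_eq_true hfx⟩
  rw [if_pos hany] at hpre
  simp only [hsps, List.all_eq_true] at hpre
  have := hpre q hq
  rw [hqin] at this
  simp only [Bool.not_true, Bool.false_or] at this
  exact of_decide_eq_true this

-- ===== VERDICT (by name: the statements are the Claim_ definitions above) =====
theorem generate_strings_len_k_spec : Claim_equal_generate_strings_len_k := by
  intro cfg k _dom hpre
  unfold Spec_generate_strings_len_k generate_strings_len_k_alt
  cases hroot : (PySem.Dict.ofList cfg).get? "root" with
  | none =>
      rw [generate_strings_len_k, pvExpandA]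
      simp only [pvDerivB, hroot]
  | some rps =>
      have hgetD : (PySem.Dict.ofList cfg).getD "root" [] = rps :=
        PySem.Dict.getD_of_get?_eq_some _ [] hroot
      rw [generate_strings_len_k, pvExpandA]
      simp only [pvDerivB, hroot, hgetD]
      apply PySem.List.foldl_congr_mem'
      intro p hp acc
      simp only [pvFixedB]
      by_cases hskip : (PySem.Str.len (PySem.Str.replace p "s" "") : Int) > k
      · rw [if_pos hskip, if_pos hskip]
      rw [if_neg hskip, if_neg hskip]
      by_cases hin : PySem.Str.isIn "s" p = false
      · rw [if_pos hin, if_pos hin]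
      rw [if_neg hin, if_neg hin]
      apply PySem.List.foldl_congr_mem'
      intro j hj acc'
      have hjr := (PySem.List.mem_pyRange_one).1 hj
      have hfx0 : (0 : Int) ≤ (PySem.Str.len (PySem.Str.replace p "s" "") : Int) := Int.natCast_nonneg _
      have hin' : PySem.Str.isIn "s" p = true := by revert hin; cases PySem.Str.isIn "s" p <;> simp
      have hfx : pvFixedB p < k := by unfold pvFixedB; omega
      have hH := pvPre_noAllS cfg k hpre rps hroot p hp hin' hfx
      have hmax : j ≤ rps.foldl (fun m p => if PySem.Str.isIn "s" p then max m (k - pvFixedB p) else m) 0 := by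
        have := pvFoldMax_ge k rps p hp hin' 0
        simp only [pvFixedB] at this ⊢
        omega
      rw [pvExpand_eq_table (PySem.Dict.ofList cfg) hH (k.toNat + 1) j _ (by omega) hmax (by omega)]
      simp only [pvFixedB]
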